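-- pv_equiv track=rewrite | github.com/uiuc-arc/felix | python/tvm/felix/utils.py | short_print_names
-- ===== SOURCE A (Python) =====
-- import typing as ty
-- from typing import Any, Dict, Iterable, List, Optional, Sequence, Tuple, Union
--
-- T1 = ty.TypeVar("T1")
--
-- T2 = ty.TypeVar("T2")
--
-- def transpose2(xs: Iterable[Tuple[T1, T2]]) -> Tuple[List[T1], List[T2]]:
--     if not xs:
--         return [], []
--     return tuple([list(xs_) for xs_ in zip(*xs)])  # type: ignore
--
-- def short_print_names(types_indices: List[Tuple[str, int]]):
--     if len(types_indices) == 1: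
--         ty, indice = types_indices[0]
--         return f"{ty}[{indice}]"
--     types, indices = transpose2(types_indices)
--     types_ = set(types)
--     if len(types) == 1:
--         ty = types_.pop()
--         return f"{ty}{sorted(indices)}"
--     return ",".join(f"{ty}[{indice}]" for ty, indice in types_indices)
-- ===== SOURCE B (Python) =====
-- def short_print_names(types_indices):
--     if len(types_indices) == 1:
--         ty, indice = types_indices[0]
--         return f"{ty}[{indice}]"
--     if types_indices and all(ty == types_indices[0][0] for ty, _ in types_indices):
--         ty = types_indices[0][0]
--         return f"{ty}[" + ", ".join(str(i) for i in sorted(i for _, i in types_indices)) + "]"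
--     return ",".join(f"{ty}[{indice}]" for ty, indice in types_indices)
-- ===== Notes on version B (the rewrite author's own statement) =====
-- stated objective: simpler
-- what changed: Drops the transpose2 helper and the set: B tests type-uniqueness with one direct scan over the pairs and compacts same-type lists, instead of transposing into two lists and building a set whose dead guard (len(types) instead of len(types_)) A never fires.
-- intended difference: On lists of two or more pairs that all share one type, A returns the comma-joined per-pair form because its guard tests len(types) (the full list) instead of len(types_) (the set), leaving the compaction branch dead; B returns the intended compact form ty + sorted-index-list, which is what the function's name and the dead branch show was meant. — e.g. on short_print_names([("t", 3), ("t", 1)]): A returns "t[3],t[1]", B returns "t[1, 3]"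
import Mathlib
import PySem

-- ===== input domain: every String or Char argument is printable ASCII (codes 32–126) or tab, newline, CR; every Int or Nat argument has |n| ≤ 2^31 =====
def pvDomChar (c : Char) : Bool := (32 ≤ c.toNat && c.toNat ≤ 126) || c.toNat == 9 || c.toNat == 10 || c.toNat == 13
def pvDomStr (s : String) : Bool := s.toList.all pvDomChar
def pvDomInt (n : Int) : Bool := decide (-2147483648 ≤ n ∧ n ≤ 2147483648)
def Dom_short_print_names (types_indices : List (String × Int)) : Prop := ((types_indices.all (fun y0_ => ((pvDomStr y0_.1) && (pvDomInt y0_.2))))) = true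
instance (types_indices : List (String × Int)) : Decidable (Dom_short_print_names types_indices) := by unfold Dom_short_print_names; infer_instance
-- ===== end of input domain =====

-- B drops the transpose2 helper and the set, testing type uniqueness with one direct
-- scan (objective: simpler); on ≥2 same-type pairs it returns the compact form that
-- A's dead guard (len(types) instead of len(types_)) was meant to produce — see D_ below.

-- ===== PORT A =====
def transpose2 (xs : List (String × Int)) : List String × List Int :=
  if xs = [] then ([], [])
  else (xs.map Prod.fst, xs.map Prod.snd)

def short_print_names (types_indices : List (String × Int)) : String :=
  if types_indices.length = 1 then
    let p := types_indices.headD ("", 0)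
    p.1 ++ "[" ++ PySem.Int.toStr p.2 ++ "]"
  else
    let tp := transpose2 types_indices
    let types := tp.1
    let indices := tp.2
    let types_ : PySem.Set String := PySem.Set.ofList types
    if types.length = 1 then
      -- unreachable branch (len types ≠ 1 here); set.pop ported as taking the set's first element
      (types_.headD "") ++ "[" ++
        String.intercalate ", " ((PySem.List.sorted indices (fun x => x) false).map PySem.Int.toStr) ++ "]"
    else
      String.intercalate "," (types_indices.map (fun p => p.1 ++ "[" ++ PySem.Int.toStr p.2 ++ "]"))

-- ===== PORT B =====
def short_print_names_alt (types_indices : List (String × Int)) : String :=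
  if types_indices.length = 1 then
    let p := types_indices.headD ("", 0)
    p.1 ++ "[" ++ PySem.Int.toStr p.2 ++ "]"
  else if !types_indices.isEmpty && types_indices.all (fun p => p.1 == (types_indices.headD ("", 0)).1) then
    (types_indices.headD ("", 0)).1 ++ "[" ++
      String.intercalate ", " ((PySem.List.sorted (types_indices.map Prod.snd) (fun x => x) false).map PySem.Int.toStr) ++ "]"
  else
    String.intercalate "," (types_indices.map (fun p => p.1 ++ "[" ++ PySem.Int.toStr p.2 ++ "]"))

-- ===== PRECONDITION & SPEC =====
-- On lists of ≥2 pairs that all share one type, A returns the comma-joined per-pair form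
-- (its guard tests len(types), the full list, instead of len(types_), the set, so its
-- compaction branch is dead); B returns the intended compact form ty + sorted index list.
def D_short_print_names (types_indices : List (String × Int)) : Prop :=
  2 ≤ types_indices.length ∧
    ∀ p ∈ types_indices, p.1 = (types_indices.headD ("", 0)).1
instance (types_indices : List (String × Int)) : Decidable (D_short_print_names types_indices) := by
  unfold D_short_print_names; infer_instance

def Spec_short_print_names (types_indices : List (String × Int)) (out : String) : Prop :=
  ¬ D_short_print_names types_indices → out = short_print_names_alt types_indices
instance (types_indices : List (String × Int)) (out : String) : Decidable (Spec_short_print_names types_indices out) := by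
  unfold Spec_short_print_names; infer_instance

def pvDiffWitness_short_print_names : (List (String × Int)) := [("t", 3), ("t", 1)]
def pvDiffWitnessOut_short_print_names : String × String := ("t[3],t[1]", "t[1, 3]")

-- ===== CLAIM (what is proved, stated in full; the proofs are below) =====
def Claim_unchanged_short_print_names : Prop := ∀ (types_indices : List (String × Int)), Dom_short_print_names types_indices → Spec_short_print_names types_indices (short_print_names types_indices)
def Claim_changed_short_print_names : Prop := Dom_short_print_names (pvDiffWitness_short_print_names) ∧ D_short_print_names (pvDiffWitness_short_print_names) ∧ short_print_names (pvDiffWitness_short_print_names) = pvDiffWitnessOut_short_print_names.1 ∧ short_print_names_alt (pvDiffWitness_short_print_names) = pvDiffWitnessOut_short_print_names.2 ∧ pvDiffWitnessOut_short_print_names.1 ≠ pvDiffWitnessOut_short_print_names.2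

-- ===== LEMMAS AND PROOFS =====

-- ===== VERDICT (by name: the statement is the Claim_ definition above) =====
theorem short_print_names_spec : Claim_unchanged_short_print_names := by
  intro ti _hdom hnd
  unfold short_print_names short_print_names_alt
  match ti with
  | [] => rfl
  | [p] => rfl
  | p :: q :: rest =>
    have hlen : (p :: q :: rest).length ≠ 1 := by simp
    have hne : ¬ (2 ≤ (p :: q :: rest).length ∧
        ∀ r ∈ (p :: q :: rest), r.1 = ((p :: q :: rest).headD ("", 0)).1) := hnd
    have hex : ¬ ∀ r ∈ (p :: q :: rest), r.1 = p.1 := by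
      intro hall
      exact hne ⟨by simp, by simpa using hall⟩
    have hall_false :
        (p :: q :: rest).all (fun r => r.1 == ((p :: q :: rest).headD ("", 0)).1) = false := by
      cases h : (p :: q :: rest).all (fun r => r.1 == ((p :: q :: rest).headD ("", 0)).1) with
      | false => rfl
      | true =>
        exact absurd (fun r hr => by simpa using List.all_eq_true.mp h r hr) hex
    have htr : transpose2 (p :: q :: rest) =
        ((p :: q :: rest).map Prod.fst, (p :: q :: rest).map Prod.snd) := by
      unfold transpose2; simp
    simp only [List.headD_cons] at hall_false
    simp [htr, hall_false]

theorem short_print_names_changed : Claim_changed_short_print_names := by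
  unfold Claim_changed_short_print_names; decide
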